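-- pv_equiv track=rewrite | github.com/lkkim-skku/OneClass_detect | catniplab/controller/controller.py | folding_160311
-- ===== SOURCE A (Python) =====
-- def classionary(content, target):
--     """
--     content와 target으로 나눠진 learning data를 target에 따라 묶은 dict로 만들어준다.
--
--     :param list content: array-like. it contains content for learning
--     :param list target: array-like. it contains target for learning
--     :return dict:
--     """
--     kv = {}
--
--     for c, t in zip(content, target):
--         if t in kv:
--             kv[t].append(c)
--         else:
--             kv[t] = [c]
--
--     return kv
--
-- def folding_160311(content, target):
--     """
--     16년 03월 11일에 작성한 folding algorithm
--
--     - 클래스별로 나눠서 학습시킨다.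
--
--     - unknown을 정해서 일부 class를 unknown으로 설정하며 fold한다.
--
--     - 0%, 10%, 20%, 30%, 40%, 50%로 나눈다.\n
--       ex. 10%: unknown: 10, 20, 30, 40, 50 나머지는 known
--
--     - 그런데 빡세게(?) 코딩했는데 애초에 python의 for문은 yield되서 순서가 무작워...ㄷㄷ
--       따라서 크게 의미는 없음...ㅋㅋ
--
--     :param list content: array-like. it contains content for learning
--     :param list target: array-like. it contains target for learning
--     :return:
--         content for learing,
--         target for learning,
--         content for examinating,
--         target for examinating
--     """
--     size = 6
--     csize = size - 1
--     lcon, ltar = [[] for _ in range(size)], [[] for _ in range(size)]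
--     econ, etar = [[] for _ in range(size)], [[] for _ in range(size)]
--
--     learningmatters = classionary(content, target)
--
--     for i, k in enumerate(learningmatters):
--         modi = i % 10
--         if modi >= csize:
--             for _i in range(modi - csize + 1):
--                 ltar[_i].append(k), lcon[_i].extend(learningmatters[k])
--         else:
--             for _i in range(size):
--                 ltar[_i].append(k), lcon[_i].extend(learningmatters[k])
--         # testing은 모든 class의 data를 다 넣습니다.
--         for _i in range(size):
--             etar[_i].append(k), econ[_i].extend(learningmatters[k])
--
--     return lcon, ltar, econ, etar
-- ===== SOURCE B (Python) =====
-- def folding_160311(content, target):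
--     size = 6
--     # group by repeated stable partition on the first remaining class (no dict)
--     rest = list(zip(content, target))
--     keys, groups = [], []
--     while rest:
--         k = rest[0][1]
--         keys.append(k)
--         groups.append([c for c, t in rest if t == k])
--         rest = [(c, t) for c, t in rest if t != k]
--     # per-class cutoff level: class i belongs to learning buckets 0..cut[i]
--     cut = [5 if i % 10 < 5 else i % 10 - 5 for i in range(len(keys))]
--     ltar = [[k for k, lv in zip(keys, cut) if j <= lv] for j in range(size)]
--     lcon = [[c for g, lv in zip(groups, cut) if j <= lv for c in g] for j in range(size)]
--     # every testing bucket is identical: build it once and copy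
--     flat = [c for g in groups for c in g]
--     return lcon, ltar, [flat[:] for _ in range(size)], [keys[:] for _ in range(size)]
-- ===== Notes on version B (the rewrite author's own statement) =====
-- stated objective: alternative
-- what changed: B drops the dict and the in-place bucket mutation entirely: it groups by repeated stable partition on the first remaining class, precomputes each class's cutoff level once, builds every learning bucket as a threshold-filtered comprehension over the (keys, cutoffs) zip, and builds the identical testing key list and flattened data once and copies them into all six testing buckets.
import Mathlib
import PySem

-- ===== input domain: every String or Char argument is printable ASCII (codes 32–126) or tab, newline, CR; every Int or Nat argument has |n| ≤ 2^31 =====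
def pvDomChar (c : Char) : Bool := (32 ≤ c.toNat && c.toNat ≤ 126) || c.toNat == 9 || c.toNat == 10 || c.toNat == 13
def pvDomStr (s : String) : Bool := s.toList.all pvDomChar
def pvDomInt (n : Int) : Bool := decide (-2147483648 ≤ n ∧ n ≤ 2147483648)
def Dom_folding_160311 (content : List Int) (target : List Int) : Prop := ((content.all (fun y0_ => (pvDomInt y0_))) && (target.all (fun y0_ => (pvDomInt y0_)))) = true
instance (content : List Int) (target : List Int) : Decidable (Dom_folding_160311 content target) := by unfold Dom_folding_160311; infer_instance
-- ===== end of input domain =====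

-- B replaces A's dict grouping + in-place bucket mutation by repeated stable
-- partition on the first remaining class, precomputed per-class cutoff levels
-- with threshold-filtered buckets, and build-once testing data (objective:
-- alternative decomposition, no speed claim).

-- ===== PORT A =====
-- helper `classionary`: group content by target, a dict in insertion order
def classionary (content : List Int) (target : List Int) : PySem.Dict Int (List Int) :=
  (List.zip content target).foldl
    (fun kv ct =>
      if kv.contains ct.2 then kv.modify ct.2 [] (fun xs => xs ++ [ct.1])
      else kv.insert ct.2 [ct.1])
    PySem.Dict.empty

-- `l[i].append(..)/extend(x)` on a list of lists (indices here are always in range)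
def pvUpd (l : List (List Int)) (i : Nat) (x : List Int) : List (List Int) :=
  l.set i (l.getD i [] ++ x)

-- the body of A's `for i, k in enumerate(learningmatters)` loop for one (i, k);
-- the enumerate counter i is the same nonnegative integer, carried as a Nat
def pvStepA (d : PySem.Dict Int (List Int)) (k : Int) (i : Nat)
    (st : List (List Int) × List (List Int) × List (List Int) × List (List Int)) :
    List (List Int) × List (List Int) × List (List Int) × List (List Int) :=
  let v := (d.get? k).getD []    -- learningmatters[k]; k ∈ d.keys, so no KeyError
  let modi := i % 10
  match st with
  | (lcon, ltar, econ, etar) =>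
    let p :=
      if 5 ≤ modi then
        (List.range (modi - 5 + 1)).foldl
          (fun p _i => (pvUpd p.1 _i v, pvUpd p.2 _i [k])) (lcon, ltar)
      else
        (List.range 6).foldl
          (fun p _i => (pvUpd p.1 _i v, pvUpd p.2 _i [k])) (lcon, ltar)
    let q :=
      (List.range 6).foldl
        (fun p _i => (pvUpd p.1 _i v, pvUpd p.2 _i [k])) (econ, etar)
    (p.1, p.2, q.1, q.2)

def pvLoopA (d : PySem.Dict Int (List Int)) :
    List Int → Nat →
    (List (List Int) × List (List Int) × List (List Int) × List (List Int)) →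
    List (List Int) × List (List Int) × List (List Int) × List (List Int)
  | [], _, st => st
  | k :: ks, i, st => pvLoopA d ks (i + 1) (pvStepA d k i st)

def folding_160311 (content : List Int) (target : List Int) :
    List (List Int) × List (List Int) × List (List Int) × List (List Int) :=
  let learningmatters := classionary content target
  pvLoopA learningmatters learningmatters.keys 0
    (List.replicate 6 [], List.replicate 6 [], List.replicate 6 [], List.replicate 6 [])

-- ===== PORT B =====
-- B's while-loop: repeatedly split off the group of the first remaining class
def pvPart : List (Int × Int) → List Int × List (List Int)
  | [] => ([], [])
  | (c, t) :: rest =>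
      let r := pvPart (rest.filter (fun p => !(p.2 == t)))
      (t :: r.1, (((c, t) :: rest).filter (fun p => p.2 == t)).map (·.1) :: r.2)
termination_by pairs => pairs.length
decreasing_by
  simp
  exact le_trans (List.length_filter_le _ _) (by simp)

-- `5 if i % 10 < 5 else i % 10 - 5`
def pvCut (i : Nat) : Nat := if i % 10 < 5 then 5 else i % 10 - 5

def folding_160311_alt (content : List Int) (target : List Int) :
    List (List Int) × List (List Int) × List (List Int) × List (List Int) :=
  let p := pvPart (content.zip target)
  let keys := p.1
  let groups := p.2
  let cut := (List.range keys.length).map pvCut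
  let ltar := (List.range 6).map
    (fun j => ((keys.zip cut).filter (fun q => decide (j ≤ q.2))).map (·.1))
  let lcon := (List.range 6).map
    (fun j => ((groups.zip cut).filter (fun q => decide (j ≤ q.2))).flatMap (·.1))
  let flat := groups.flatMap id
  (lcon, ltar, List.replicate 6 flat, List.replicate 6 keys)

-- ===== PRECONDITION & SPEC =====
def Spec_folding_160311 (content : List Int) (target : List Int) (out : List (List Int) × List (List Int) × List (List Int) × List (List Int)) : Prop := out = folding_160311_alt content target
instance (content : List Int) (target : List Int) (out : List (List Int) × List (List Int) × List (List Int) × List (List Int)) : Decidable (Spec_folding_160311 content target out) := by unfold Spec_folding_160311; infer_instance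

-- ===== CLAIM (what is proved, stated in full; the proofs are below) =====
def Claim_equal_folding_160311 : Prop := ∀ (content : List Int) (target : List Int), Dom_folding_160311 content target → Spec_folding_160311 content target (folding_160311 content target)

-- ===== LEMMAS AND PROOFS =====

-- the group of class k in first-occurrence pairs
def grpP (pairs : List (Int × Int)) (k : Int) : List Int :=
  (pairs.filter (fun q => q.2 == k)).map (·.1)

-- A's inclusion predicate for class counter i in learning bucket j
def pvInclB (i j : Nat) : Bool := i % 10 < 5 || j ≤ i % 10 - 5

-- closed forms for the per-bucket contributions, indexed by bucket j and counter i
def tC (j : Nat) : Nat → List Int → List Int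
  | _, [] => []
  | i, k :: ks => (if pvInclB i j then [k] else []) ++ tC j (i + 1) ks

def cC (f : Int → List Int) (j : Nat) : Nat → List Int → List Int
  | _, [] => []
  | i, k :: ks => (if pvInclB i j then f k else []) ++ cC f j (i + 1) ks

lemma classionary_eq (content target : List Int) :
    classionary content target =
      (content.zip target).foldl
        (fun g ct => g.modify ct.2 [] (fun xs => xs ++ [ct.1])) PySem.Dict.empty := by
  unfold classionary
  apply PySem.List.foldl_congr_mem
  intro kv ct _
  by_cases h : kv.contains ct.2
  · simp [h]
  · simp only [Bool.not_eq_true] at h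
    simp [h, PySem.Dict.insert, PySem.Dict.modify, PySem.Dict.getD_of_not_contains kv [] h]

lemma keys_classionary (content target : List Int) :
    (classionary content target).keys = PySem.Set.ofList ((content.zip target).map (·.2)) := by
  rw [classionary_eq,
    PySem.Dict.keys_foldl_modify_key (content.zip target) (fun ct => ct.2) []
      (fun _ ct => fun xs => xs ++ [ct.1]) PySem.Dict.empty]
  simp [PySem.Set.update_nil_left]

lemma getD_classionary (content target : List Int) (k : Int) :
    (classionary content target).getD k [] = grpP (content.zip target) k := by
  rw [classionary_eq]
  have h := PySem.Dict.getD_foldl_modify_append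
    ((content.zip target).map Prod.swap) (PySem.Dict.empty (κ := Int) (ν := List Int)) k
  rw [List.foldl_map] at h
  simp only [Prod.fst_swap, Prod.snd_swap, List.filter_map, List.map_map] at h
  rw [grpP, h]
  simp [Function.comp_def]

lemma stepA_eval (d : PySem.Dict Int (List Int)) (k : Int) (i : Nat)
    (b0 b1 b2 b3 b4 b5 t0 t1 t2 t3 t4 t5 e0 e1 e2 e3 e4 e5 u0 u1 u2 u3 u4 u5 : List Int) :
    pvStepA d k i ([b0, b1, b2, b3, b4, b5], [t0, t1, t2, t3, t4, t5],
                   [e0, e1, e2, e3, e4, e5], [u0, u1, u2, u3, u4, u5]) =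
      (let v := (d.get? k).getD []
       ([b0 ++ (if pvInclB i 0 then v else []), b1 ++ (if pvInclB i 1 then v else []),
         b2 ++ (if pvInclB i 2 then v else []), b3 ++ (if pvInclB i 3 then v else []),
         b4 ++ (if pvInclB i 4 then v else []), b5 ++ (if pvInclB i 5 then v else [])],
        [t0 ++ (if pvInclB i 0 then [k] else []), t1 ++ (if pvInclB i 1 then [k] else []),
         t2 ++ (if pvInclB i 2 then [k] else []), t3 ++ (if pvInclB i 3 then [k] else []),
         t4 ++ (if pvInclB i 4 then [k] else []), t5 ++ (if pvInclB i 5 then [k] else [])],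
        [e0 ++ v, e1 ++ v, e2 ++ v, e3 ++ v, e4 ++ v, e5 ++ v],
        [u0 ++ [k], u1 ++ [k], u2 ++ [k], u3 ++ [k], u4 ++ [k], u5 ++ [k]])) := by
  simp only [pvStepA, pvInclB]
  by_cases h5 : i % 10 < 5
  · have h : ¬ 5 ≤ i % 10 := by omega
    simp [h, h5, pvUpd, List.range_succ, List.getD]
  · have h9 : i % 10 < 10 := Nat.mod_lt _ (by norm_num)
    have hc : i % 10 = 5 ∨ i % 10 = 6 ∨ i % 10 = 7 ∨ i % 10 = 8 ∨ i % 10 = 9 := by omega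
    rcases hc with h | h | h | h | h <;> simp [h, pvUpd, List.range_succ, List.getD]

lemma loopA_eq (g : PySem.Dict Int (List Int)) (ks : List Int) :
    ∀ (i : Nat) (b0 b1 b2 b3 b4 b5 t0 t1 t2 t3 t4 t5 e0 e1 e2 e3 e4 e5 u0 u1 u2 u3 u4 u5 : List Int),
    pvLoopA g ks i ([b0, b1, b2, b3, b4, b5], [t0, t1, t2, t3, t4, t5],
                    [e0, e1, e2, e3, e4, e5], [u0, u1, u2, u3, u4, u5]) =
      (let f := fun k => ((g.get? k).getD [] : List Int)
       ([b0 ++ cC f 0 i ks, b1 ++ cC f 1 i ks, b2 ++ cC f 2 i ks,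
         b3 ++ cC f 3 i ks, b4 ++ cC f 4 i ks, b5 ++ cC f 5 i ks],
        [t0 ++ tC 0 i ks, t1 ++ tC 1 i ks, t2 ++ tC 2 i ks,
         t3 ++ tC 3 i ks, t4 ++ tC 4 i ks, t5 ++ tC 5 i ks],
        [e0 ++ ks.flatMap f, e1 ++ ks.flatMap f, e2 ++ ks.flatMap f,
         e3 ++ ks.flatMap f, e4 ++ ks.flatMap f, e5 ++ ks.flatMap f],
        [u0 ++ ks, u1 ++ ks, u2 ++ ks, u3 ++ ks, u4 ++ ks, u5 ++ ks])) := by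
  induction ks with
  | nil => intro i b0 b1 b2 b3 b4 b5 t0 t1 t2 t3 t4 t5 e0 e1 e2 e3 e4 e5 u0 u1 u2 u3 u4 u5
           simp [pvLoopA, cC, tC]
  | cons k ks ih =>
      intro i b0 b1 b2 b3 b4 b5 t0 t1 t2 t3 t4 t5 e0 e1 e2 e3 e4 e5 u0 u1 u2 u3 u4 u5
      simp only [pvLoopA, stepA_eval, ih, cC, tC, List.flatMap_cons,
        List.append_assoc, List.singleton_append]

-- B's inclusion test `j <= cut[i]` is A's predicate, for buckets j ≤ 5
lemma incl_cut (i j : Nat) (hj : j ≤ 5) : decide (j ≤ pvCut i) = pvInclB i j := by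
  unfold pvCut pvInclB
  by_cases h : i % 10 < 5
  · simpa [h] using hj
  · simp [h]

lemma bucketT (j : Nat) (hj : j ≤ 5) :
    ∀ (ks : List Int) (i : Nat),
      ((ks.zip ((List.range' i ks.length).map pvCut)).filter
          (fun q => decide (j ≤ q.2))).map (·.1) = tC j i ks := by
  intro ks
  induction ks with
  | nil => intro i; simp [tC]
  | cons k ks ih =>
      intro i
      rw [List.length_cons, List.range'_succ]
      simp only [List.map_cons, List.zip_cons_cons, List.filter_cons]
      rw [incl_cut i j hj]
      by_cases h : pvInclB i j = true
      · simp [h, tC, ih]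
      · simp only [Bool.not_eq_true] at h
        simp [h, tC, ih]

lemma bucketC (f : Int → List Int) (j : Nat) (hj : j ≤ 5) :
    ∀ (ks : List Int) (i : Nat),
      (((ks.map f).zip ((List.range' i ks.length).map pvCut)).filter
          (fun q => decide (j ≤ q.2))).flatMap (·.1) = cC f j i ks := by
  intro ks
  induction ks with
  | nil => intro i; simp [cC]
  | cons k ks ih =>
      intro i
      rw [List.length_cons, List.range'_succ]
      simp only [List.map_cons, List.zip_cons_cons, List.filter_cons]
      rw [incl_cut i j hj]
      by_cases h : pvInclB i j = true
      · simp [h, cC, ih]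
      · simp only [Bool.not_eq_true] at h
        simp [h, cC, ih]

-- removing t from set(ts) = set of ts with t filtered out
lemma discard_ofList (ts : List Int) (t : Int) :
    PySem.Set.discard (PySem.Set.ofList ts) t =
      PySem.Set.ofList (ts.filter (fun x => !(x == t))) := by
  induction ts with
  | nil => rfl
  | cons x ts ih =>
      rw [PySem.Set.ofList_cons, List.filter_cons]
      by_cases hx : x = t
      · subst hx
        simp only [beq_self_eq_true, Bool.not_true, Bool.false_eq_true, if_false]
        rw [← ih]
        simp [PySem.Set.discard, List.filter_filter, Bool.and_self]
      · have hb : (!(x == t)) = true := by simpa using hx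
        rw [if_pos hb, PySem.Set.ofList_cons, ← ih]
        simp only [PySem.Set.discard, List.filter_cons, hb, List.filter_filter]
        rw [if_pos (by simp)]
        congr 1
        apply List.filter_congr
        intro a _
        rw [Bool.and_comm]

lemma part_spec_aux : ∀ (n : Nat) (pairs : List (Int × Int)), pairs.length ≤ n →
    pvPart pairs =
      (PySem.Set.ofList (pairs.map (·.2)),
       (PySem.Set.ofList (pairs.map (·.2))).map (grpP pairs)) := by
  intro n
  induction n with
  | zero =>
      intro pairs h
      have hnil : pairs = [] := List.eq_nil_of_length_eq_zero (by omega)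
      subst hnil
      rw [pvPart]
      rfl
  | succ n ih =>
      intro pairs h
      match pairs with
      | [] => rw [pvPart]; rfl
      | (c, t) :: rest =>
        have hlen : (rest.filter (fun p => !(p.2 == t))).length ≤ n :=
          le_trans (List.length_filter_le _ _) (by simp at h; omega)
        have ihr := ih _ hlen
        have hmapf : (rest.filter (fun p => !(p.2 == t))).map (·.2) =
            (rest.map (·.2)).filter (fun x => !(x == t)) := by
          rw [List.filter_map]; rfl
        have hkeys : PySem.Set.ofList (((c, t) :: rest).map (·.2)) =
            t :: PySem.Set.ofList ((rest.filter (fun p => !(p.2 == t))).map (·.2)) := by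
          rw [List.map_cons, PySem.Set.ofList_cons, discard_ofList, hmapf]
        have hgrp : ∀ k ∈ PySem.Set.ofList ((rest.filter (fun p => !(p.2 == t))).map (·.2)),
            grpP (rest.filter (fun p => !(p.2 == t))) k = grpP ((c, t) :: rest) k := by
          intro k hk
          rw [PySem.Set.mem_ofList] at hk
          obtain ⟨p, hp, hpk⟩ := List.mem_map.mp hk
          have hkt : k ≠ t := by
            have := (List.mem_filter.mp hp).2
            simp only [Bool.not_eq_eq_eq_not, Bool.not_true, beq_eq_false_iff_ne] at this
            rw [← hpk]; exact this
          unfold grpP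
          rw [List.filter_filter, List.filter_cons]
          rw [if_neg (by simp [Ne.symm hkt])]
          congr 1
          apply List.filter_congr
          intro a _
          by_cases ha : a.2 = k
          · simp [ha, hkt]
          · simp [ha]
        rw [pvPart]
        simp only [ihr]
        rw [hkeys, List.map_cons]
        refine Prod.ext rfl ?_
        simp only
        congr 1
        exact List.map_congr_left hgrp

lemma part_spec (pairs : List (Int × Int)) :
    pvPart pairs =
      (PySem.Set.ofList (pairs.map (·.2)),
       (PySem.Set.ofList (pairs.map (·.2))).map (grpP pairs)) :=
  part_spec_aux pairs.length pairs le_rfl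

theorem folding_eq_alt (content target : List Int) :
    folding_160311 content target = folding_160311_alt content target := by
  unfold folding_160311 folding_160311_alt
  rw [part_spec]
  simp only
  have hrepl : (List.replicate 6 ([] : List Int)) = [[], [], [], [], [], []] := rfl
  rw [hrepl, keys_classionary, loopA_eq]
  have hf : (fun k => (((classionary content target).get? k).getD [] : List Int)) =
      grpP (content.zip target) := by
    funext k
    rw [← PySem.Dict.getD_eq_get?_getD, getD_classionary]
  simp only [hf]
  have hrange : List.range 6 = [0, 1, 2, 3, 4, 5] := rfl
  rw [hrange]
  simp only [List.map_cons, List.map_nil, List.range_eq_range']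
  rw [bucketT 0 (by omega), bucketT 1 (by omega), bucketT 2 (by omega),
    bucketT 3 (by omega), bucketT 4 (by omega), bucketT 5 (by omega),
    bucketC (grpP (content.zip target)) 0 (by omega),
    bucketC (grpP (content.zip target)) 1 (by omega),
    bucketC (grpP (content.zip target)) 2 (by omega),
    bucketC (grpP (content.zip target)) 3 (by omega),
    bucketC (grpP (content.zip target)) 4 (by omega),
    bucketC (grpP (content.zip target)) 5 (by omega)]
  simp [List.flatMap_map, List.replicate]

-- ===== VERDICT (by name: the statement is the Claim_ definition above) =====
theorem folding_160311_spec : Claim_equal_folding_160311 := by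
  intro content target _
  unfold Spec_folding_160311
  exact folding_eq_alt content target
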